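-- pv_equiv track=rewrite | github.com/michael-marynowicz/Classification-d-avis-de-consommateurs | bug.py | context
-- ===== SOURCE A (Python) =====
-- def context(file_content,neutres): #essais pour avoir le context
--     context_of_neutre_word = []
--     file_content_list = list(file_content.split(" "))
--     for i in range(len(file_content_list)):
--         if (file_content_list[i] in neutres and (i>0 and i<len(file_content_list)-1)):
--             context = file_content_list[i-1]+' '+file_content_list[i]+' '+file_content_list[i+1]
--             context_of_neutre_word.append(context)
--             file_content=file_content.replace(context,"")
--
--     return context_of_neutre_word,file_content
-- ===== SOURCE B (Python) =====
-- def context(file_content, neutres):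
--     words = file_content.split(" ")
--     positions = {}
--     for i, w in enumerate(words):
--         positions.setdefault(w, []).append(i)
--     hits = []
--     seen = set()
--     for w in neutres:
--         if w not in seen:
--             seen.add(w)
--             hits.extend(positions.get(w, []))
--     hits.sort()
--     triples = [words[i - 1] + ' ' + words[i] + ' ' + words[i + 1]
--                for i in hits if 0 < i < len(words) - 1]
--     text = file_content
--     for t in triples:
--         text = text.replace(t, "")
--     return triples, text
-- ===== Notes on version B (the rewrite author's own statement) =====
-- stated objective: alternative
-- what changed: B replaces A's per-word linear scan of neutres by an inverted index word->positions built in one pass over the split words; it then gathers hit indices per distinct neutral word (outer loop over neutres with a seen-set), sorts them back into text order, builds the triples from the sorted indices and applies the replacements in a final pass.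
import Mathlib
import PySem

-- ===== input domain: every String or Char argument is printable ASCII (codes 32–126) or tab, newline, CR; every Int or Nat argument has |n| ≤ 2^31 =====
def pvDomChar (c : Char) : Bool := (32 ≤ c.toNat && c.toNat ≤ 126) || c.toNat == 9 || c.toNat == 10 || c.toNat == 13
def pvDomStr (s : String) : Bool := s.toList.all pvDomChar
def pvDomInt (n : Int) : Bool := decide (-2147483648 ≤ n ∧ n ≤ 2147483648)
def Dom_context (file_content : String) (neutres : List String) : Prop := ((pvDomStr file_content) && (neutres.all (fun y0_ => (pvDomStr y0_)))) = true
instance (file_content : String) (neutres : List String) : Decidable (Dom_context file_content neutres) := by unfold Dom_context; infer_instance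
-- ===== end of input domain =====

-- ===== PORT A =====
-- B inverts the work: an index word→positions built in one pass replaces A's per-word scan of
-- neutres, hit indices are gathered per distinct neutral word and sorted, then the replacements
-- are applied in a second pass; objective: an alternative algorithm of the same cost.
-- Step for step from Source A: foldl over range(len(words)) carrying (list, file_content).
def context (file_content : String) (neutres : List String) : List String × String :=
  let file_content_list := (PySem.Str.split? file_content " ").getD []
  (List.range file_content_list.length).foldl
    (fun st i =>
      if neutres.contains (file_content_list.getD i "") && decide (0 < i) && decide (i < file_content_list.length - 1) then
        let ctx := file_content_list.getD (i - 1) "" ++ " " ++ file_content_list.getD i "" ++ " " ++ file_content_list.getD (i + 1) ""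
        (st.1 ++ [ctx], PySem.Str.replace st.2 ctx "")
      else st)
    ([], file_content)

-- ===== PORT B =====
-- Step for step from Source B: build the positions index, gather hit indices over neutres with a
-- seen-set, sort them, build the triples, then fold the replaces.
def context_alt (file_content : String) (neutres : List String) : List String × String :=
  let words := (PySem.Str.split? file_content " ").getD []
  let positions := (PySem.List.enumerate words).foldl
      (fun d p => PySem.Dict.modify d p.2 [] (fun x => x ++ [p.1])) PySem.Dict.empty
  let st := neutres.foldl
      (fun (st : PySem.Set String × List Int) w =>
        if PySem.Set.contains st.1 w then st
        else (PySem.Set.add st.1 w, st.2 ++ PySem.Dict.getD positions w []))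
      (PySem.Set.empty, [])
  let hits := PySem.List.sorted st.2 (fun x => x)
  let triples := hits.filterMap (fun i =>
      if decide (0 < i) && decide (i < (words.length : Int) - 1) then
        some (PySem.List.pyGetD words (i - 1) "" ++ " " ++ PySem.List.pyGetD words i "" ++ " " ++ PySem.List.pyGetD words (i + 1) "")
      else none)
  (triples, triples.foldl (fun s t => PySem.Str.replace s t "") file_content)

-- ===== PRECONDITION & SPEC =====
def Spec_context (file_content : String) (neutres : List String) (out : List String × String) : Prop := out = context_alt file_content neutres
instance (file_content : String) (neutres : List String) (out : List String × String) : Decidable (Spec_context file_content neutres out) := by unfold Spec_context; infer_instance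

-- ===== CLAIM (what is proved, stated in full; the proofs are below) =====
def Claim_equal_context : Prop := ∀ (file_content : String) (neutres : List String), Dom_context file_content neutres → Spec_context file_content neutres (context file_content neutres)

-- ===== LEMMAS AND PROOFS =====

-- the guarded step of A's loop, abstracted over its test and its built triple
def pvStep (cond : Nat → Bool) (ctx : Nat → String) (st : List String × String) (i : Nat) :
    List String × String :=
  if cond i then (st.1 ++ [ctx i], PySem.Str.replace st.2 (ctx i) "") else st

-- loop fission: one fold carrying (list, text) = collect first, then fold the replaces
theorem pvFission (cond : Nat → Bool) (ctx : Nat → String) :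
    ∀ (idxs : List Nat) (acc : List String) (s : String),
      idxs.foldl (pvStep cond ctx) (acc, s)
      = (acc ++ idxs.filterMap (fun i => if cond i then some (ctx i) else none),
         (idxs.filterMap (fun i => if cond i then some (ctx i) else none)).foldl
           (fun s t => PySem.Str.replace s t "") s) := by
  intro idxs
  induction idxs with
  | nil => intro acc s; simp
  | cons i rest ih =>
    intro acc s
    by_cases h : cond i = true <;>
      simp [pvStep, h, ih]

-- B's positions index: the list stored under w is exactly the indices of w, in range order
theorem pvPositions (words : List String) (w : String) :
    PySem.Dict.getD ((PySem.List.enumerate words).foldl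
        (fun d p => PySem.Dict.modify d p.2 [] (fun x => x ++ [p.1])) PySem.Dict.empty) w []
      = (PySem.List.pyRange 0 words.length).filter
          (fun j => PySem.List.pyGetD words j "" == w) := by
  have h : (PySem.List.enumerate words).foldl
        (fun d p => PySem.Dict.modify d p.2 [] (fun x => x ++ [p.1])) PySem.Dict.empty
      = ((PySem.List.enumerate words).map Prod.swap).foldl
        (fun d p => PySem.Dict.modify d p.1 [] (fun x => x ++ [p.2])) PySem.Dict.empty := by
    rw [List.foldl_map]
    rfl
  rw [h, PySem.Dict.getD_foldl_modify_append]
  rw [PySem.List.enumerate_eq_map_pyRange words ""]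
  simp [List.filter_map, List.map_map, Function.comp_def, PySem.List.len]

-- B's gathering loop: its result is nodup and holds exactly the positions of processed words
theorem pvGather (pos : String → List Int)
    (hkey : ∀ w i, i ∈ pos w → ∀ w', i ∈ pos w' → w' = w)
    (hnod : ∀ w, (pos w).Nodup) :
    ∀ (ns : List String) (seen : PySem.Set String) (acc : List Int),
      acc.Nodup →
      (∀ i ∈ acc, ∃ w ∈ seen, i ∈ pos w) →
      (∀ w ∈ seen, ∀ i ∈ pos w, i ∈ acc) →
      (ns.foldl
        (fun (st : PySem.Set String × List Int) w =>
          if PySem.Set.contains st.1 w then st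
          else (PySem.Set.add st.1 w, st.2 ++ pos w))
        (seen, acc)).2.Nodup ∧
      (∀ i, i ∈ (ns.foldl
        (fun (st : PySem.Set String × List Int) w =>
          if PySem.Set.contains st.1 w then st
          else (PySem.Set.add st.1 w, st.2 ++ pos w))
        (seen, acc)).2 ↔ ∃ w, (w ∈ seen ∨ w ∈ ns) ∧ i ∈ pos w) := by
  intro ns
  induction ns with
  | nil =>
    intro seen acc h1 h2 h3
    refine ⟨h1, fun i => ⟨fun hi => ?_, fun ⟨w, hw, hiw⟩ => ?_⟩⟩
    · obtain ⟨w, hw, hiw⟩ := h2 i hi; exact ⟨w, Or.inl hw, hiw⟩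
    · rcases hw with hw | hw
      · exact h3 w hw i hiw
      · simp at hw
  | cons v ns ih =>
    intro seen acc h1 h2 h3
    simp only [List.foldl_cons]
    by_cases hv : PySem.Set.contains seen v = true
    · rw [if_pos hv]
      have hvs : v ∈ seen := (PySem.Set.contains_iff seen v).mp hv
      obtain ⟨hn, hm⟩ := ih seen acc h1 h2 h3
      refine ⟨hn, fun i => (hm i).trans ?_⟩
      constructor
      · rintro ⟨w, hw | hw, hiw⟩
        · exact ⟨w, Or.inl hw, hiw⟩
        · exact ⟨w, Or.inr (List.mem_cons_of_mem v hw), hiw⟩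
      · rintro ⟨w, hw | hw, hiw⟩
        · exact ⟨w, Or.inl hw, hiw⟩
        · rcases List.mem_cons.mp hw with rfl | hw
          · exact ⟨w, Or.inl hvs, hiw⟩
          · exact ⟨w, Or.inr hw, hiw⟩
    · rw [if_neg hv]
      have hvs : v ∉ seen := fun h => hv ((PySem.Set.contains_iff seen v).mpr h)
      have h1' : (acc ++ pos v).Nodup := by
        refine List.Nodup.append h1 (hnod v) ?_
        intro i hia hiv
        obtain ⟨w, hw, hiw⟩ := h2 i hia
        exact hvs (hkey v i hiv w hiw ▸ hw)
      have h2' : ∀ i ∈ acc ++ pos v, ∃ w ∈ PySem.Set.add seen v, i ∈ pos w := by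
        intro i hi
        rcases List.mem_append.mp hi with hi | hi
        · obtain ⟨w, hw, hiw⟩ := h2 i hi
          exact ⟨w, (PySem.Set.mem_add seen v w).mpr (Or.inl hw), hiw⟩
        · exact ⟨v, (PySem.Set.mem_add seen v v).mpr (Or.inr rfl), hi⟩
      have h3' : ∀ w ∈ PySem.Set.add seen v, ∀ i ∈ pos w, i ∈ acc ++ pos v := by
        intro w hw i hiw
        rcases (PySem.Set.mem_add seen v w).mp hw with hw | rfl
        · exact List.mem_append.mpr (Or.inl (h3 w hw i hiw))
        · exact List.mem_append.mpr (Or.inr hiw)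
      obtain ⟨hn, hm⟩ := ih (PySem.Set.add seen v) (acc ++ pos v) h1' h2' h3'
      refine ⟨hn, fun i => (hm i).trans ?_⟩
      constructor
      · rintro ⟨w, hw | hw, hiw⟩
        · rcases (PySem.Set.mem_add seen v w).mp hw with hw | rfl
          · exact ⟨w, Or.inl hw, hiw⟩
          · exact ⟨w, Or.inr (by simp), hiw⟩
        · exact ⟨w, Or.inr (List.mem_cons_of_mem v hw), hiw⟩
      · rintro ⟨w, hw | hw, hiw⟩
        · exact ⟨w, Or.inl ((PySem.Set.mem_add seen v w).mpr (Or.inl hw)), hiw⟩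
        · rcases List.mem_cons.mp hw with rfl | hw
          · exact ⟨w, Or.inl ((PySem.Set.mem_add _ _ _).mpr (Or.inr rfl)), hiw⟩
          · exact ⟨w, Or.inr hw, hiw⟩

-- sorting B's gathered indices yields the increasing filter of the full index range
theorem pvSortedHits (words : List String) (neutres : List String) :
    PySem.List.sorted
      ((neutres.foldl
        (fun (st : PySem.Set String × List Int) w =>
          if PySem.Set.contains st.1 w then st
          else (PySem.Set.add st.1 w, st.2 ++
            ((PySem.List.pyRange 0 words.length).filter
              (fun j => PySem.List.pyGetD words j "" == w))))
        (PySem.Set.empty, [])).2) (fun x => x)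
    = (PySem.List.pyRange 0 words.length).filter
        (fun j => neutres.contains (PySem.List.pyGetD words j "")) := by
  set pos := fun w => (PySem.List.pyRange 0 (words.length : Int)).filter
      (fun j => PySem.List.pyGetD words j "" == w) with hpos
  have hmemPos : ∀ w i, i ∈ pos w ↔ i ∈ PySem.List.pyRange 0 (words.length : Int) ∧ PySem.List.pyGetD words i "" = w := by
    intro w i; simp [hpos, List.mem_filter]
  have hkey : ∀ w i, i ∈ pos w → ∀ w', i ∈ pos w' → w' = w := by
    intro w i hi w' hi'
    have h1 := ((hmemPos w i).mp hi).2
    have h2 := ((hmemPos w' i).mp hi').2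
    rw [← h1, ← h2]
  have hnod : ∀ w, (pos w).Nodup := fun w =>
    (PySem.List.nodup_pyRange_one 0 words.length).filter _
  obtain ⟨hn, hm⟩ := pvGather pos hkey hnod neutres PySem.Set.empty []
    List.nodup_nil (by intro i hi; simp at hi) (by intro w hw; simp [PySem.Set.empty] at hw)
  apply PySem.List.sorted_eq_of_perm_of_pairwise_lt
  · rw [List.perm_ext_iff_of_nodup ((PySem.List.nodup_pyRange_one 0 words.length).filter _) hn]
    intro i
    rw [hm i]
    simp only [List.mem_filter]
    constructor
    · rintro ⟨hr, hc⟩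
      refine ⟨PySem.List.pyGetD words i "", Or.inr ?_, (hmemPos _ i).mpr ⟨hr, rfl⟩⟩
      simpa using hc
    · rintro ⟨w, hw, hiw⟩
      obtain ⟨hr, hv⟩ := (hmemPos w i).mp hiw
      rcases hw with hw | hw
      · simp [PySem.Set.empty] at hw
      · exact ⟨hr, by simp [hv, hw]⟩
  · exact (PySem.List.pairwise_lt_pyRange_one 0 words.length).filter _

-- ===== VERDICT (by name: the statement is the Claim_ definition above) =====
theorem context_spec : Claim_equal_context := by
  intro file_content neutres _
  unfold Spec_context context context_alt
  set ws := (PySem.Str.split? file_content " ").getD [] with hws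
  simp only [pvPositions ws]
  rw [pvSortedHits ws neutres]
  refine Eq.trans
    (pvFission
      (fun i => neutres.contains (ws.getD i "") && decide (0 < i) && decide (i < ws.length - 1))
      (fun i => ws.getD (i - 1) "" ++ " " ++ ws.getD i "" ++ " " ++ ws.getD (i + 1) "")
      (List.range ws.length) [] file_content) ?_
  rw [List.nil_append]
  have hfuse :
      ((PySem.List.pyRange 0 ws.length).filter
        (fun j => neutres.contains (PySem.List.pyGetD ws j ""))).filterMap
        (fun i => if decide (0 < i) && decide (i < (ws.length : Int) - 1) then
          some (PySem.List.pyGetD ws (i - 1) "" ++ " " ++ PySem.List.pyGetD ws i "" ++ " " ++ PySem.List.pyGetD ws (i + 1) "")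
        else none)
      = (List.range ws.length).filterMap
        (fun i => if neutres.contains (ws.getD i "") && decide (0 < i) && decide (i < ws.length - 1) then
          some (ws.getD (i - 1) "" ++ " " ++ ws.getD i "" ++ " " ++ ws.getD (i + 1) "")
        else none) := by
    rw [List.filterMap_filter, PySem.List.pyRange_one, List.filterMap_map]
    apply List.filterMap_congr
    intro k hk
    rw [List.mem_range] at hk
    simp only [Function.comp_def, zero_add]
    have e0 : PySem.List.pyGetD ws (k : Int) "" = ws.getD k "" := by
      exact PySem.List.pyGetD_natCast ws k ""
    have hc0 : decide (0 < (k : Int)) = decide (0 < k) := by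
      simp only [decide_eq_decide]; omega
    have hc1 : decide ((k : Int) < (ws.length : Int) - 1) = decide (k < ws.length - 1) := by
      simp only [decide_eq_decide]; omega
    simp only [e0, hc0, hc1]
    by_cases hp : ws[k]?.getD "" ∈ neutres <;>
      by_cases h0 : 0 < k <;>
        by_cases h1 : k < ws.length - 1
    · have em : PySem.List.pyGetD ws ((k : Int) - 1) "" = ws.getD (k - 1) "" := by
        have h : (k : Int) - 1 = ((k - 1 : Nat) : Int) := by omega
        rw [h]; exact PySem.List.pyGetD_natCast ws (k-1) ""
      have ep : PySem.List.pyGetD ws ((k : Int) + 1) "" = ws.getD (k + 1) "" := by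
        have h : (k : Int) + 1 = ((k + 1 : Nat) : Int) := by omega
        rw [h]; exact PySem.List.pyGetD_natCast ws (k+1) ""
      simp [hp, h0, h1, em, ep]
    all_goals simp [hp, h0, h1]
  rw [hfuse]
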